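-- pv_equiv track=rewrite | github.com/OSLL/Middleware_testing | testing_tool/plotting.py | get_grouped_filenames
-- ===== SOURCE A (Python) =====
-- def get_grouped_filenames(filenames):
--     res = []
--     for filename in filenames[0]:
--         res.append([filename])
--     for k in range(0, len(res)):
--         filename = res[k][0]
--         for i in range(1, len(filenames)):
--             for f in filenames[i]:
--                 if f[f.rfind('/')+1:] == filename[filename.rfind('/')+1:]:
--                     res[k].append(f)
--     return res
-- ===== SOURCE B (Python) =====
-- def get_grouped_filenames(filenames):
--     # Build, per non-first list, a dict basename -> files with that basename (in order),
--     # then assemble each group with O(1) dict lookups per base file.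
--     maps = []
--     for fl in filenames[1:]:
--         m = {}
--         for f in fl:
--             m.setdefault(f[f.rfind('/')+1:], []).append(f)
--         maps.append(m)
--     res = []
--     for f0 in filenames[0]:
--         base = f0[f0.rfind('/')+1:]
--         group = [f0]
--         for m in maps:
--             group.extend(m.get(base, []))
--         res.append(group)
--     return res
-- ===== Notes on version B (the rewrite author's own statement) =====
-- stated objective: faster
-- what changed: Instead of rescanning every other list for every base filename (three nested loops), B builds one basename-keyed dict per non-first list in a single pass and assembles each group by O(1) dict lookups.
-- outside the precondition, e.g. on get_grouped_filenames([]): A raises IndexError, B raises IndexError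
import Mathlib
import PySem

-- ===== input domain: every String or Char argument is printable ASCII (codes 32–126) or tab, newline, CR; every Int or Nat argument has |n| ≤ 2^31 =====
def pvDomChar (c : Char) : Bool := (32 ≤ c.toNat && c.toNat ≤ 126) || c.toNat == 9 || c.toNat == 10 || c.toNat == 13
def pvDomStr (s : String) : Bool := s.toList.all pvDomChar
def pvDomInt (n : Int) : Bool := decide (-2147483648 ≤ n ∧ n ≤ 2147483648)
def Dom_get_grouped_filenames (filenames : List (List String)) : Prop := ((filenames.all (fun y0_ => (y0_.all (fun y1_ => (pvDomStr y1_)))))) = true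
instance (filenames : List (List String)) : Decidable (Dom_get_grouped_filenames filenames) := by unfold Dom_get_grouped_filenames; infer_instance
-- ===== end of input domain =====

-- B replaces A's rescan of every other list for each base filename by per-list
-- basename-keyed dicts built once, then O(1) lookups per group (objective: faster).


-- Python's  f[f.rfind('/')+1:]  (shared basename helper, used by both ports)
def pvBase (f : String) : String := PySem.Str.slice f (some (PySem.Str.rfind f "/" + 1)) none

-- ===== PORT A =====
def get_grouped_filenames (filenames : List (List String)) : List (List String) :=
  match PySem.List.pyGet? filenames 0 with
  | none => []   -- filenames[0] raises IndexError here; excluded by Pre_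
  | some first =>
    let res := first.foldl (fun res filename => res ++ [[filename]]) []
    (PySem.List.pyRange 0 (PySem.List.len res) 1).foldl (fun res k =>
      let filename := (PySem.List.pyGetD res k []).headD ""   -- res[k][0]; always in range
      (PySem.List.pyRange 1 (PySem.List.len filenames) 1).foldl (fun res i =>
        (PySem.List.pyGetD filenames i []).foldl (fun res f =>
          if pvBase f == pvBase filename then
            res.set k.toNat (PySem.List.pyGetD res k [] ++ [f])   -- res[k].append(f)
          else res) res) res) res

-- ===== PORT B =====
def get_grouped_filenames_alt (filenames : List (List String)) : List (List String) :=
  match PySem.List.pyGet? filenames 0 with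
  | none => []   -- filenames[0] raises IndexError here; excluded by Pre_
  | some first =>
    let maps := (PySem.List.slice filenames (some 1) none).foldl
      (fun maps fl => maps ++
        [fl.foldl (fun m f => m.modify (pvBase f) [] (· ++ [f])) PySem.Dict.empty]) []
    first.foldl (fun res f0 =>
      res ++ [maps.foldl (fun group m => group ++ m.getD (pvBase f0) []) [f0]]) []

-- ===== PRECONDITION & SPEC =====
-- Pre_ excludes only the empty outer list, on which Python A (and B) raises IndexError at filenames[0].
def Pre_get_grouped_filenames (filenames : List (List String)) : Prop := filenames ≠ []
instance (filenames : List (List String)) : Decidable (Pre_get_grouped_filenames filenames) := by unfold Pre_get_grouped_filenames; infer_instance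
def pvWitness_get_grouped_filenames : List (List String) := [["a/x", "y"], ["b/x", "z"]]

def Spec_get_grouped_filenames (filenames : List (List String)) (out : List (List String)) : Prop := out = get_grouped_filenames_alt filenames
instance (filenames : List (List String)) (out : List (List String)) : Decidable (Spec_get_grouped_filenames filenames out) := by unfold Spec_get_grouped_filenames; infer_instance

-- ===== CLAIM (what is proved, stated in full; the proofs are below) =====
def Claim_equal_get_grouped_filenames : Prop := ∀ (filenames : List (List String)), Dom_get_grouped_filenames filenames → Pre_get_grouped_filenames filenames → Spec_get_grouped_filenames filenames (get_grouped_filenames filenames)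

-- ===== LEMMAS AND PROOFS =====

-- the files of the non-first lists sharing fn's basename, in A's append order
def pvAdds (filenames : List (List String)) (fn : String) : List String :=
  (filenames.drop 1).flatMap (fun fl => fl.filter (fun f => pvBase f == pvBase fn))

-- B's per-list dict looks a basename up to exactly the in-order filter of that list
lemma pv_dict_getD (fl : List String) :
    ∀ (m : PySem.Dict String (List String)) (b : String),
      (fl.foldl (fun m f => m.modify (pvBase f) [] (· ++ [f])) m).getD b []
        = m.getD b [] ++ fl.filter (fun f => pvBase f == b) := by
  induction fl with
  | nil => simp
  | cons f t ih =>
    intro m b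
    simp only [List.foldl_cons, List.filter_cons, ih, PySem.Dict.getD_modify]
    by_cases h : b = pvBase f
    · simp [h]
    · simp [h, beq_iff_eq, Ne.symm h]

-- A's innermost loop over one list fl, appending the matches to res[k]
lemma pv_inner (p : String → Bool) (fl : List String) :
    ∀ (res : List (List String)) (k : ℕ), k < res.length →
      fl.foldl (fun res f =>
          if p f then res.set k (res.getD k [] ++ [f]) else res) res
        = res.set k (res.getD k [] ++ fl.filter p) := by
  induction fl with
  | nil => intro res k hk; simp [List.getElem?_eq_getElem hk, List.getD]
  | cons f t ih =>
    intro res k hk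
    simp only [List.foldl_cons, List.filter_cons]
    by_cases hp : p f
    · rw [if_pos hp, if_pos hp, ih _ k (by simpa using hk)]
      simp [List.getD, hk, List.set_set]
    · rw [if_neg hp, if_neg hp, ih _ k hk]

-- A's middle loop over the non-first lists
lemma pv_middle (p : String → Bool) (fls : List (List String)) :
    ∀ (res : List (List String)) (k : ℕ), k < res.length →
      fls.foldl (fun res fl =>
          fl.foldl (fun res f =>
            if p f then res.set k (res.getD k [] ++ [f]) else res) res) res
        = res.set k (res.getD k [] ++ fls.flatMap (fun fl => fl.filter p)) := by
  induction fls with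
  | nil => intro res k hk; simp [List.getElem?_eq_getElem hk, List.getD]
  | cons fl t ih =>
    intro res k hk
    simp only [List.foldl_cons, List.flatMap_cons]
    rw [pv_inner p fl res k hk, ih _ k (by simpa using hk)]
    simp [List.getD, hk, List.set_set]

-- A's outer loop over the group indices, with the already-finished prefix generalized
lemma pv_outer (filenames : List (List String)) (todo : List String) :
    ∀ (done : List (List String)),
      (PySem.List.pyRange (done.length : ℤ) ((done.length : ℤ) + (todo.length : ℤ)) 1).foldl
        (fun res k =>
          let filename := (PySem.List.pyGetD res k []).headD ""
          (PySem.List.pyRange 1 (PySem.List.len filenames) 1).foldl (fun res i =>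
            (PySem.List.pyGetD filenames i []).foldl (fun res f =>
              if pvBase f == pvBase filename then
                res.set k.toNat (PySem.List.pyGetD res k [] ++ [f])
              else res) res) res)
        (done ++ todo.map (fun f => [f]))
        = done ++ todo.map (fun f => f :: pvAdds filenames f) := by
  induction todo with
  | nil => intro done; simp [PySem.List.pyRange_one_eq_nil]
  | cons f t ih =>
    intro done
    have hrange : PySem.List.pyRange (done.length : ℤ) ((done.length : ℤ) + ((f :: t).length : ℤ)) 1
        = (done.length : ℤ) :: PySem.List.pyRange ((done.length : ℤ) + 1) ((done.length : ℤ) + ((f :: t).length : ℤ)) 1 :=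
      PySem.List.pyRange_one_cons (by push_cast [List.length_cons]; omega)
    rw [hrange, List.map_cons, List.foldl_cons]
    have hget : (done ++ [f] :: List.map (fun f => [f]) t).getD done.length [] = [f] := by
      simp [List.getD]
    have hstep : List.foldl
        (fun res i => List.foldl (fun res f_1 =>
            if pvBase f_1 == pvBase ((PySem.List.pyGetD (done ++ [f] :: List.map (fun f => [f]) t) (done.length : ℤ) []).headD "")
            then res.set ((done.length : ℤ)).toNat (PySem.List.pyGetD res ((done.length : ℤ)) [] ++ [f_1]) else res)
          res (PySem.List.pyGetD filenames i []))
        (done ++ [f] :: List.map (fun f => [f]) t)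
        (PySem.List.pyRange 1 (PySem.List.len filenames) 1)
        = done ++ (f :: pvAdds filenames f) :: List.map (fun f => [f]) t := by
      simp only [Int.toNat_natCast, PySem.List.pyGetD_natCast]
      rw [hget]
      rw [PySem.List.foldl_pyRange_pyGetD filenames [] _ _ (by norm_num)]
      simp only [List.headD_cons]
      refine Eq.trans (pv_middle (fun g => pvBase g == pvBase f)
          (List.drop (Int.toNat 1) filenames)
          (done ++ [f] :: t.map (fun f => [f])) done.length (by simp)) ?_
      rw [hget, List.set_append_right _ _ (le_refl _)]
      simp [pvAdds]
    rw [hstep]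
    have hrange2 : PySem.List.pyRange ((done.length : ℤ) + 1) ((done.length : ℤ) + ((f :: t).length : ℤ)) 1
        = PySem.List.pyRange (((done ++ [f :: pvAdds filenames f]).length : ℤ))
            (((done ++ [f :: pvAdds filenames f]).length : ℤ) + (t.length : ℤ)) 1 := by
      congr 1 <;> push_cast [List.length_cons, List.length_append, List.length_nil] <;> omega
    rw [hrange2,
      show done ++ (f :: pvAdds filenames f) :: List.map (fun f => [f]) t
        = (done ++ [f :: pvAdds filenames f]) ++ List.map (fun f => [f]) t by simp]
    exact (ih (done ++ [f :: pvAdds filenames f])).trans (by simp)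

-- A computes, group by group, the base file followed by the ordered basename matches
lemma pv_A_eq (first : List String) (rest : List (List String)) :
    get_grouped_filenames (first :: rest)
      = first.map (fun f => f :: pvAdds (first :: rest) f) := by
  unfold get_grouped_filenames
  simp only [PySem.List.pyGet?_zero_cons, PySem.List.foldl_append_singleton_eq_map,
    List.nil_append]
  have h := pv_outer (first :: rest) first []
  simp only [List.length_nil, Nat.cast_zero, List.nil_append, zero_add] at h
  rw [show PySem.List.len (first.map (fun filename => [filename])) = (first.length : ℤ) by
    simp [PySem.List.len]]
  exact h

-- B computes the same groups through its per-list dicts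
lemma pv_B_eq (first : List String) (rest : List (List String)) :
    get_grouped_filenames_alt (first :: rest)
      = first.map (fun f => f :: pvAdds (first :: rest) f) := by
  unfold get_grouped_filenames_alt
  simp only [PySem.List.pyGet?_zero_cons, PySem.List.slice_from_one, List.tail_cons,
    PySem.List.foldl_append_singleton_eq_map, List.nil_append]
  refine List.map_congr_left ?_
  intro f0 _
  rw [PySem.List.foldl_append_eq_flatMap, List.flatMap_map]
  rw [List.singleton_append]
  congr 1
  simp only [pvAdds, List.drop_succ_cons, List.drop_zero]
  refine List.flatMap_congr ?_
  intro fl _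
  rw [pv_dict_getD]
  simp

-- ===== VERDICT (by name: the statement is the Claim_ definition above) =====
theorem get_grouped_filenames_spec : Claim_equal_get_grouped_filenames := by
  intro filenames _ hpre
  unfold Spec_get_grouped_filenames
  cases filenames with
  | nil => exact absurd rfl hpre
  | cons first rest => rw [pv_A_eq, pv_B_eq]
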